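-- pv_equiv track=rewrite | github.com/BISCodeRepo/PGpep | PGpep.py | how_rna_read_for_es
-- ===== SOURCE A (Python) =====
-- def how_rna_read_for_es(rna_start,cigar_str, start, end):
--     now_seq = ''
--     temp_concat = ''
--     last_M_num = 0
--     now_position = rna_start
--     jnc_len = end-start
--     need_jnc = False
--     need_mapping = False
--     for i in range(len(cigar_str)):
--         now_seq = cigar_str[i:i+1]
--         if now_seq.isdigit():
--             temp_concat += now_seq
--         elif now_seq.isalpha():
--             if now_seq == 'M': ## TODO: end 도 검사
--                 now_position += int(temp_concat)
--                 if now_position-1 == start: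
--                     need_jnc = True
--                 if need_mapping == True:
--                     return True
--                 temp_concat = ''
--             elif now_seq == 'N':
--                 if need_jnc:
--                     if int(temp_concat) == jnc_len:
--                         need_mapping = True
--                     else:
--                         return False
--                 now_position += int(temp_concat)
--                 temp_concat = ''
--             elif now_seq == 'D':
--                 return False
--             elif now_seq == 'I':
--                 return False
--             else:
--                 temp_concat = ''
--     return False
-- ===== SOURCE B (Python) =====
-- def how_rna_read_for_es(rna_start, cigar_str, start, end):
--     # Stage 1: tokenize into (digit-run, letter) pairs; other characters are skipped.
--     toks = []
--     num = ''
--     for ch in cigar_str: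
--         if ch.isdigit():
--             num += ch
--         elif ch.isalpha():
--             toks.append((num, ch))
--             num = ''
--     # Stage 2: only tokens before the first D or I can produce a match.
--     cut = []
--     for tok in toks:
--         if tok[1] == 'D' or tok[1] == 'I':
--             break
--         cut.append(tok)
--     # Stage 3: resolve spans (M/N consume their digit run, other ops span 0).
--     ops = [(op, int(num) if op == 'M' or op == 'N' else 0) for num, op in cut]
--     # Stage 4: anchor = first M whose end position is start+1; keep the suffix after it.
--     pos = rna_start
--     rest = None
--     for t in range(len(ops)):
--         pos += ops[t][1]
--         if ops[t][0] == 'M' and pos - 1 == start: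
--             rest = ops[t + 1:]
--             break
--     if rest is None:
--         return False
--     # Stage 5: the first N after the anchor must span exactly end - start.
--     nt = next((t for t in range(len(rest)) if rest[t][0] == 'N'), None)
--     if nt is None or rest[nt][1] != end - start:
--         return False
--     # Stage 6: an M must follow that N, and every N before that M must also span
--     # end - start (the scan would bail out at such an N before reaching the M).
--     tail = rest[nt + 1:]
--     mt = next((t for t in range(len(tail)) if tail[t][0] == 'M'), None)
--     if mt is None:
--         return False
--     return all(n == end - start for op, n in tail[:mt] if op == 'N')
-- ===== Notes on version B (the rewrite author's own statement) =====
-- stated objective: alternative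
-- what changed: A interleaves parsing and matching in one character-level state machine with need_jnc/need_mapping flags; B is staged: tokenize, truncate at the first D/I, resolve spans, locate the anchor M by prefix-sum position, then pattern-match the junction as first-N-of-correct-length followed by an M with only correct-length Ns in between, with no flag state.
-- outside the precondition, e.g. on how_rna_read_for_es(0, '1M5NM', 0, 3): A returns False, B raises ValueError; on how_rna_read_for_es(0, '1M3N1MM', 0, 3): A returns True, B raises ValueError
import Mathlib
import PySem

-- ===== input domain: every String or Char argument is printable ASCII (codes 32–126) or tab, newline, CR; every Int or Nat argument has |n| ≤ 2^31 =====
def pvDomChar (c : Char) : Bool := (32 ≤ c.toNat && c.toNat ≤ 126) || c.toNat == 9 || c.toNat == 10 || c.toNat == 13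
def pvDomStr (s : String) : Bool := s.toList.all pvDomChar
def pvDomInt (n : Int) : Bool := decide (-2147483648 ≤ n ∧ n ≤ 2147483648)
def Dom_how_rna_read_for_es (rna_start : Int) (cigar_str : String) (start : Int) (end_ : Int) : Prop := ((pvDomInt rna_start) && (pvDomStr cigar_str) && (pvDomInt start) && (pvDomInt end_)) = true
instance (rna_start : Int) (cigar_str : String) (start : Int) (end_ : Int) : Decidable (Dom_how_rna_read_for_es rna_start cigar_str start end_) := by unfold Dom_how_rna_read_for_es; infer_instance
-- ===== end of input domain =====

-- B replaces A's one-pass character state machine (need_jnc/need_mapping flags) by staged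
-- passes: tokenize, truncate at the first D/I, resolve spans, find the anchor M by prefix-sum
-- position, then pattern-match the junction on the suffix; equality of the return value is
-- proved on Pre_ (A raises ValueError outside it).

-- ===== PORT A =====
-- A's char loop; state = (remaining chars, temp_concat, now_position, need_jnc, need_mapping);
-- none = ValueError from int('') (excluded by Pre_).
def howA_loop (start jnc_len : Int) : List Char → List Char → Int → Bool → Bool → Option Bool
  | [], _, _, _, _ => some false
  | c :: rest, temp, pos, nj, nm =>
    if PySem.Chars.isdigit c then
      howA_loop start jnc_len rest (temp ++ [c]) pos nj nm
    else if PySem.Chars.isalpha c then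
      if c = 'M' then
        match PySem.Int.ofChars? temp with
        | none => none
        | some k =>
          let pos' := pos + k
          let nj' := if pos' - 1 = start then true else nj
          if nm then some true
          else howA_loop start jnc_len rest [] pos' nj' nm
      else if c = 'N' then
        match PySem.Int.ofChars? temp with
        | none => none
        | some k =>
          if nj then
            if k = jnc_len then howA_loop start jnc_len rest [] (pos + k) nj true
            else some false
          else howA_loop start jnc_len rest [] (pos + k) nj nm
      else if c = 'D' then some false
      else if c = 'I' then some false
      else howA_loop start jnc_len rest [] pos nj nm
    else
      howA_loop start jnc_len rest temp pos nj nm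

def how_rna_read_for_es (rna_start : Int) (cigar_str : String) (start : Int) (end_ : Int) : Bool :=
  (howA_loop start (end_ - start) cigar_str.toList [] rna_start false false).getD false

-- ===== PORT B =====
-- Stage 1 of Source B: tokenize into (digit-run, letter) pairs.
def howB_tokenize : List Char → List Char → List (List Char × Char)
  | [], _ => []
  | c :: rest, digits =>
    if PySem.Chars.isdigit c then howB_tokenize rest (digits ++ [c])
    else if PySem.Chars.isalpha c then (digits, c) :: howB_tokenize rest []
    else howB_tokenize rest digits

-- Stage 2 of Source B: keep only the tokens before the first D or I.
def howB_cut : List (List Char × Char) → List (List Char × Char)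
  | [] => []
  | t :: rest => if t.2 = 'D' ∨ t.2 = 'I' then [] else t :: howB_cut rest

-- Stage 3 of Source B: resolve spans; none = ValueError from int('') (outside Pre_).
def howB_resolve : List (List Char × Char) → Option (List (Char × Int))
  | [] => some []
  | (num, op) :: rest =>
    if op = 'M' ∨ op = 'N' then
      match PySem.Int.ofChars? num with
      | none => none
      | some n => (howB_resolve rest).map ((op, n) :: ·)
    else (howB_resolve rest).map ((op, (0:Int)) :: ·)

-- Stage 4 of Source B: suffix after the first M whose end position is start+1.
def howB_anchor (start : Int) : List (Char × Int) → Int → Option (List (Char × Int))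
  | [], _ => none
  | (op, n) :: rest, pos =>
    let pos' := pos + n
    if op = 'M' ∧ pos' - 1 = start then some rest
    else howB_anchor start rest pos'

-- Stage 5 of Source B: span of the first N and the tail after it.
def howB_firstN : List (Char × Int) → Option (Int × List (Char × Int))
  | [] => none
  | (op, n) :: rest => if op = 'N' then some (n, rest) else howB_firstN rest

-- Stage 6 of Source B: prefix strictly before the first M (none if there is no M).
def howB_firstM : List (Char × Int) → Option (List (Char × Int))
  | [] => none
  | (op, n) :: rest => if op = 'M' then some [] else (howB_firstM rest).map ((op, n) :: ·)

def how_rna_read_for_es_alt (rna_start : Int) (cigar_str : String) (start : Int) (end_ : Int) : Bool :=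
  match howB_resolve (howB_cut (howB_tokenize cigar_str.toList [])) with
  | none => false
  | some ops =>
    let jnc := end_ - start
    match howB_anchor start ops rna_start with
    | none => false
    | some rest =>
      match howB_firstN rest with
      | none => false
      | some (n, tail) =>
        if n ≠ jnc then false
        else match howB_firstM tail with
          | none => false
          | some pre => pre.all (fun t => !(t.1 = 'N') || (t.2 = jnc))

-- ===== PRECONDITION & SPEC =====
-- Syntactic well-formedness scan for Pre_: every 'M'/'N' before the first 'D'/'I' must carry
-- an int()-parsable digit run; the scan only tokenizes the string (no position/flag state).
def pvOkCigar : List Char → List Char → Bool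
  | [], _ => true
  | c :: rest, temp =>
    if PySem.Chars.isdigit c then pvOkCigar rest (temp ++ [c])
    else if c = 'M' ∨ c = 'N' then (PySem.Int.ofChars? temp).isSome && pvOkCigar rest []
    else if c = 'D' ∨ c = 'I' then true
    else if PySem.Chars.isalpha c then pvOkCigar rest []
    else pvOkCigar rest temp

-- Pre_ excludes malformed CIGAR strings in which some 'M' or 'N' before the first 'D'/'I' has
-- no digits since the preceding letter: there A raises ValueError (int('')) unless it happens
-- to exit earlier; B raises ValueError on all of them (it resolves every span up front).
def Pre_how_rna_read_for_es (rna_start : Int) (cigar_str : String) (start : Int) (end_ : Int) : Prop :=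
  pvOkCigar cigar_str.toList [] = true
instance (rna_start : Int) (cigar_str : String) (start : Int) (end_ : Int) : Decidable (Pre_how_rna_read_for_es rna_start cigar_str start end_) := by unfold Pre_how_rna_read_for_es; infer_instance

def pvWitness_how_rna_read_for_es : Int × String × Int × Int := (0, "5M3N4M", 4, 7)

def Spec_how_rna_read_for_es (rna_start : Int) (cigar_str : String) (start : Int) (end_ : Int) (out : Bool) : Prop := out = how_rna_read_for_es_alt rna_start cigar_str start end_
instance (rna_start : Int) (cigar_str : String) (start : Int) (end_ : Int) (out : Bool) : Decidable (Spec_how_rna_read_for_es rna_start cigar_str start end_ out) := by unfold Spec_how_rna_read_for_es; infer_instance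

-- ===== CLAIM (what is proved, stated in full; the proofs are below) =====
def Claim_equal_how_rna_read_for_es : Prop := ∀ (rna_start : Int) (cigar_str : String) (start : Int) (end_ : Int), Dom_how_rna_read_for_es rna_start cigar_str start end_ → Pre_how_rna_read_for_es rna_start cigar_str start end_ → Spec_how_rna_read_for_es rna_start cigar_str start end_ (how_rna_read_for_es rna_start cigar_str start end_)

-- ===== LEMMAS AND PROOFS =====

-- Proof-side token-level machine: A's state machine lifted to (digits, letter) tokens.
def howT (start jnc_len : Int) : List (List Char × Char) → Int → Bool → Bool → Option Bool
  | [], _, _, _ => some false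
  | (num, op) :: rest, pos, nj, nm =>
    if op = 'M' then
      match PySem.Int.ofChars? num with
      | none => none
      | some k =>
        let pos' := pos + k
        let nj' := if pos' - 1 = start then true else nj
        if nm then some true else howT start jnc_len rest pos' nj' nm
    else if op = 'N' then
      match PySem.Int.ofChars? num with
      | none => none
      | some k =>
        if nj then
          if k = jnc_len then howT start jnc_len rest (pos + k) nj true
          else some false
        else howT start jnc_len rest (pos + k) nj nm
    else if op = 'D' ∨ op = 'I' then some false
    else howT start jnc_len rest pos nj nm

-- Proof-side machine over resolved (op, span) pairs (no D/I present).
def howR (start jnc : Int) : List (Char × Int) → Int → Bool → Bool → Bool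
  | [], _, _, _ => false
  | (op, n) :: rest, pos, nj, nm =>
    if op = 'M' then
      let pos' := pos + n
      let nj' := if pos' - 1 = start then true else nj
      if nm then true else howR start jnc rest pos' nj' nm
    else if op = 'N' then
      if nj then
        if n = jnc then howR start jnc rest (pos + n) nj true else false
      else howR start jnc rest (pos + n) nj nm
    else howR start jnc rest (pos + n) nj nm

-- L1: A's char loop equals the token machine on the tokenization.
theorem howA_loop_eq_howT (start jnc_len : Int) (cs : List Char) :
    ∀ (temp : List Char) (pos : Int) (nj nm : Bool),
      howA_loop start jnc_len cs temp pos nj nm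
        = howT start jnc_len (howB_tokenize cs temp) pos nj nm := by
  induction cs with
  | nil => intro temp pos nj nm; simp [howA_loop, howB_tokenize, howT]
  | cons c rest ih =>
    intro temp pos nj nm
    by_cases hd : PySem.Chars.isdigit c = true
    · simp [howA_loop, howB_tokenize, hd, ih]
    · by_cases ha : PySem.Chars.isalpha c = true
      · by_cases hM : c = 'M'
        · subst hM
          simp only [howA_loop, howB_tokenize, howT, hd, ha, if_true, if_false,
            Bool.false_eq_true]
          cases PySem.Int.ofChars? temp with
          | none => simp
          | some k =>
            simp only []
            by_cases hnm : nm = true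
            · simp [hnm]
            · simp [hnm, ih]
        · by_cases hN : c = 'N'
          · subst hN
            simp only [howA_loop, howB_tokenize, howT, hd, ha, hM, if_true, if_false,
              Bool.false_eq_true]
            cases PySem.Int.ofChars? temp with
            | none => simp
            | some k =>
              simp only []
              by_cases hnj : nj = true
              · by_cases hk : k = jnc_len
                · simp [hnj, hk, ih]
                · simp [hnj, hk]
              · simp [hnj, ih]
          · by_cases hD : c = 'D'
            · subst hD; simp [howA_loop, howB_tokenize, howT, hd, ha]
            · by_cases hI : c = 'I'
              · subst hI; simp [howA_loop, howB_tokenize, howT, hd, ha, hD]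
              · simp [howA_loop, howB_tokenize, howT, hd, ha, hM, hN, hD, hI, ih]
      · simp [howA_loop, howB_tokenize, hd, ha, ih]

-- L2: when resolving the cut token list succeeds, the token machine equals howR on it.
theorem howT_eq_howR (start jnc : Int) (ts : List (List Char × Char)) :
    ∀ (ops : List (Char × Int)) (pos : Int) (nj nm : Bool),
      howB_resolve (howB_cut ts) = some ops →
      howT start jnc ts pos nj nm = some (howR start jnc ops pos nj nm) := by
  induction ts with
  | nil =>
    intro ops pos nj nm h
    simp [howB_cut, howB_resolve] at h
    subst h
    simp [howT, howR]
  | cons t rest ih =>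
    intro ops pos nj nm h
    obtain ⟨num, op⟩ := t
    by_cases hDI : op = 'D' ∨ op = 'I'
    · simp [howB_cut, hDI, howB_resolve] at h
      subst h
      have hM : op ≠ 'M' := by rcases hDI with h' | h' <;> subst h' <;> decide
      have hN : op ≠ 'N' := by rcases hDI with h' | h' <;> subst h' <;> decide
      simp [howT, hM, hN, hDI, howR]
    · simp only [howB_cut, hDI, if_false, howB_resolve] at h
      by_cases hMN : op = 'M' ∨ op = 'N'
      · simp only [hMN, if_true] at h
        cases hk : PySem.Int.ofChars? num with
        | none => simp [hk] at h
        | some k =>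
          simp only [hk, Option.map_eq_some_iff] at h
          obtain ⟨ops', hres, hops⟩ := h
          subst hops
          rcases hMN with hM | hN
          · subst hM
            simp only [howT, hk, if_true, howR]
            by_cases hnm : nm = true
            · simp [hnm]
            · simp [hnm, ih _ _ _ _ hres]
          · subst hN
            simp only [howT, hk, if_true, if_false, howR]
            by_cases hnj : nj = true
            · by_cases hkj : k = jnc
              · simp [hnj, hkj, ih _ _ _ _ hres]
              · simp [hnj, hkj]
            · simp [hnj, ih _ _ _ _ hres]
      · push_neg at hMN
        simp only [hMN.1, hMN.2, or_self, if_false, Option.map_eq_some_iff] at h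
        obtain ⟨ops', hres, hops⟩ := h
        subst hops
        simp [howT, hMN.1, hMN.2, hDI, howR, ih _ _ _ _ hres]

-- L5: with both flags set, howR is the "first M, with only correct Ns before it" pattern.
theorem howR_tt_tt (start jnc : Int) (ops : List (Char × Int)) :
    ∀ (pos : Int),
      howR start jnc ops pos true true
        = match howB_firstM ops with
          | none => false
          | some pre => pre.all (fun t => !(t.1 = 'N') || (t.2 = jnc)) := by
  induction ops with
  | nil => intro pos; simp [howR, howB_firstM]
  | cons t rest ih =>
    intro pos
    obtain ⟨op, n⟩ := t
    by_cases hM : op = 'M'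
    · subst hM; simp [howR, howB_firstM]
    · by_cases hN : op = 'N'
      · subst hN
        by_cases hn : n = jnc
        · simp only [howR, if_true, if_false, hn, hM, howB_firstM, Bool.false_eq_true]
          rw [ih]
          cases howB_firstM rest <;> simp [hn]
        · simp only [howR, howB_firstM, hM, hn, if_true, if_false, Bool.false_eq_true]
          cases howB_firstM rest <;> simp [hn]
      · simp only [howR, howB_firstM, hM, hN, if_false, Bool.false_eq_true]
        rw [ih]
        cases howB_firstM rest <;> simp [hM, hN]

-- L4: with need_jnc set, howR is the "first N must span jnc, then L5" pattern.
theorem howR_tt_ff (start jnc : Int) (ops : List (Char × Int)) :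
    ∀ (pos : Int),
      howR start jnc ops pos true false
        = match howB_firstN ops with
          | none => false
          | some (n, tail) =>
            if n ≠ jnc then false
            else match howB_firstM tail with
              | none => false
              | some pre => pre.all (fun t => !(t.1 = 'N') || (t.2 = jnc)) := by
  induction ops with
  | nil => intro pos; simp [howR, howB_firstN]
  | cons t rest ih =>
    intro pos
    obtain ⟨op, n⟩ := t
    by_cases hN : op = 'N'
    · subst hN
      by_cases hn : n = jnc
      · simp only [howR, howB_firstN, if_true, hn, if_false, Bool.false_eq_true,
          ite_not, decide_true]
        rw [howR_tt_tt]
        simp [hn]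
      · simp [howR, howB_firstN, hn]
    · by_cases hM : op = 'M'
      · subst hM; simp [howR, howB_firstN, ih]
      · simp [howR, howB_firstN, hM, hN, ih]

-- L3: with no flags set, howR scans for the anchor M, then behaves as L4.
theorem howR_ff_ff (start jnc : Int) (ops : List (Char × Int)) :
    ∀ (pos : Int),
      howR start jnc ops pos false false
        = match howB_anchor start ops pos with
          | none => false
          | some rest =>
            match howB_firstN rest with
            | none => false
            | some (n, tail) =>
              if n ≠ jnc then false
              else match howB_firstM tail with
                | none => false
                | some pre => pre.all (fun t => !(t.1 = 'N') || (t.2 = jnc)) := by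
  induction ops with
  | nil => intro pos; simp [howR, howB_anchor]
  | cons t rest ih =>
    intro pos
    obtain ⟨op, n⟩ := t
    by_cases hhit : op = 'M' ∧ pos + n - 1 = start
    · obtain ⟨hM, hp⟩ := hhit
      subst hM
      simp only [howB_anchor, hp, and_self, if_true]
      have h1 : howR start jnc (('M', n) :: rest) pos false false
          = howR start jnc rest (pos + n) true false := by
        simp [howR, hp]
      rw [h1, howR_tt_ff]
    · have ha : howB_anchor start ((op, n) :: rest) pos = howB_anchor start rest (pos + n) := by
        simp only [howB_anchor]
        rw [if_neg hhit]
      rw [ha]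
      by_cases hM : op = 'M'
      · subst hM
        have hp : ¬(pos + n - 1 = start) := fun hp => hhit ⟨rfl, hp⟩
        have h1 : howR start jnc (('M', n) :: rest) pos false false
            = howR start jnc rest (pos + n) false false := by
          simp [howR, hp]
        rw [h1]; exact ih (pos + n)
      · have h1 : howR start jnc ((op, n) :: rest) pos false false
            = howR start jnc rest (pos + n) false false := by
          by_cases hN : op = 'N' <;> simp [howR, hM, hN]
        rw [h1]; exact ih (pos + n)

-- Pre_'s scan implies that resolving the cut token list succeeds.
theorem resolve_of_ok (cs : List Char) :
    ∀ (temp : List Char), pvOkCigar cs temp = true →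
      ∃ ops, howB_resolve (howB_cut (howB_tokenize cs temp)) = some ops := by
  induction cs with
  | nil => intro temp _; exact ⟨[], by simp [howB_tokenize, howB_cut, howB_resolve]⟩
  | cons c rest ih =>
    intro temp h
    by_cases hd : PySem.Chars.isdigit c = true
    · simp only [pvOkCigar, hd, if_true] at h
      simpa [howB_tokenize, hd] using ih _ h
    · by_cases hMN : c = 'M' ∨ c = 'N'
      · have ha : PySem.Chars.isalpha c = true := by
          rcases hMN with h' | h' <;> subst h' <;> decide
      
        have hDI : ¬(c = 'D' ∨ c = 'I') := by
          rcases hMN with h' | h' <;> subst h' <;> decide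
        simp only [pvOkCigar, hd, hMN, if_true, if_false, Bool.and_eq_true,
          Bool.false_eq_true] at h
        obtain ⟨hs, hrest⟩ := h
        obtain ⟨ops, hops⟩ := ih _ hrest
        obtain ⟨n, hn⟩ := Option.isSome_iff_exists.mp hs
        refine ⟨(c, n) :: ops, ?_⟩
        simp [howB_tokenize, hd, ha, howB_cut, hDI, howB_resolve, hMN, hn, hops]
      · by_cases hDI : c = 'D' ∨ c = 'I'
        · have ha : PySem.Chars.isalpha c = true := by
            rcases hDI with h' | h' <;> subst h' <;> decide
          exact ⟨[], by simp [howB_tokenize, hd, ha, howB_cut, hDI, howB_resolve]⟩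
        · by_cases ha : PySem.Chars.isalpha c = true
          · simp only [pvOkCigar, hd, hMN, hDI, ha, if_true, if_false,
              Bool.false_eq_true] at h
            obtain ⟨ops, hops⟩ := ih _ h
            refine ⟨(c, 0) :: ops, ?_⟩
            have hM : c ≠ 'M' := fun h' => hMN (Or.inl h')
            have hN : c ≠ 'N' := fun h' => hMN (Or.inr h')
            simp [howB_tokenize, hd, ha, howB_cut, hDI, howB_resolve, hM, hN, hops]
          · simp only [pvOkCigar, hd, hMN, hDI, ha, if_false, Bool.false_eq_true] at h
            simpa [howB_tokenize, hd, ha] using ih _ h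

-- ===== VERDICT (by name: the statement is the Claim_ definition above) =====
theorem how_rna_read_for_es_spec : Claim_equal_how_rna_read_for_es := by
  intro rna_start cigar_str start end_ _ hpre
  unfold Spec_how_rna_read_for_es how_rna_read_for_es how_rna_read_for_es_alt
  obtain ⟨ops, hops⟩ := resolve_of_ok cigar_str.toList [] hpre
  rw [howA_loop_eq_howT, howT_eq_howR start (end_ - start) _ ops rna_start false false hops,
    hops, Option.getD_some, howR_ff_ff]
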